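-- pv_equiv track=rewrite | github.com/martins-vds/AzureTRE | api_app/db/repositories/user_resources.py | get_parent_workspace_properties
-- ===== SOURCE A (Python) =====
-- def get_parent_workspace_properties(properties: dict, parent_workspace_properties: dict) -> dict:
--     """
--     returns a dict of parent workspace properties that are required by the template
--     """
--
--     parent_prefix = "parent_"
--     properties_copy = {**properties}
--
--     if not parent_workspace_properties:
--         return properties_copy
--
--     parent_property_keys = [key for key in properties_copy.keys() if key.startswith("parent_")]
--
--     if parent_property_keys:
--         for key in parent_property_keys:
--             parent_property_name = key[len(parent_prefix):]
--             if parent_property_name in parent_workspace_properties: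
--                 properties_copy[key] = parent_workspace_properties[parent_property_name]
--
--     return properties_copy
-- ===== SOURCE B (Python) =====
-- def get_parent_workspace_properties(properties: dict, parent_workspace_properties: dict) -> dict:
--     """
--     returns a dict of parent workspace properties that are required by the template
--     """
--     properties_copy = {**properties}
--     for name, value in parent_workspace_properties.items():
--         key = "parent_" + name
--         if key in properties_copy:
--             properties_copy[key] = value
--     return properties_copy
-- ===== Notes on version B (the rewrite author's own statement) =====
-- stated objective: simpler
-- what changed: B drives the loop from parent_workspace_properties.items() and builds 'parent_' + name, testing membership in the copy, instead of A's prefix-filter comprehension over the copy's keys followed by string slicing and lookups into the parent dict; the filter pass, the slicing and the empty-dict early return disappear.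
import Mathlib
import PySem

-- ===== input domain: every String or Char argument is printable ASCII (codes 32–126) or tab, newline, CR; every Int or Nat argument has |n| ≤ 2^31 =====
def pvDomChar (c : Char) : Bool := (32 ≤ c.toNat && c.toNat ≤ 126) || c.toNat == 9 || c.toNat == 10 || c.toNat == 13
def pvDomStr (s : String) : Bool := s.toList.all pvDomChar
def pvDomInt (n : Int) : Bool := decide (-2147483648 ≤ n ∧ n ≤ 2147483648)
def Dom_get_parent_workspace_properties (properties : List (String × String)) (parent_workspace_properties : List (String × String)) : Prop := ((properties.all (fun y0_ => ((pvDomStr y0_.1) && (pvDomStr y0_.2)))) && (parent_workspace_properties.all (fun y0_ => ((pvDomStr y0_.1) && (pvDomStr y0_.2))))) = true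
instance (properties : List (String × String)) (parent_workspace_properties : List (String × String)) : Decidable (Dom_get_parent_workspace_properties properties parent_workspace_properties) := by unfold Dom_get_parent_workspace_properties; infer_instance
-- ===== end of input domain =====

-- B iterates over the parent dict's items, building 'parent_' + name and testing membership in the
-- copy, instead of A's prefix-filter over the copy's keys plus string slicing; objective: simpler.

-- ===== PORT A =====
-- loop body of A's 'for key in parent_property_keys' (d = properties_copy, pd = parent_workspace_properties)
def pvStepA (pd : PySem.Dict String String) (d : PySem.Dict String String) (key : String) : PySem.Dict String String :=
  -- parent_property_name = key[len("parent_"):]; if it is in pd: d[key] = pd[parent_property_name]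
  match pd.get? (PySem.Str.slice key (some 7) none) with
  | some v => d.insert key v
  | none => d

def get_parent_workspace_properties (properties : List (String × String)) (parent_workspace_properties : List (String × String)) : List (String × String) :=
  let properties_copy := PySem.Dict.mk properties
  if parent_workspace_properties.isEmpty then
    properties_copy.items
  else
    let pd := PySem.Dict.mk parent_workspace_properties
    let parent_property_keys := properties_copy.keys.filter (fun key => PySem.Str.startswith key "parent_")
    if parent_property_keys.isEmpty then
      properties_copy.items
    else
      (parent_property_keys.foldl (pvStepA pd) properties_copy).items

-- ===== PORT B =====
-- loop body of B's 'for name, value in parent_workspace_properties.items()'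
def pvStepB (d : PySem.Dict String String) (p : String × String) : PySem.Dict String String :=
  -- key = "parent_" + name; if key in properties_copy: properties_copy[key] = value
  if d.contains ("parent_" ++ p.1) then d.insert ("parent_" ++ p.1) p.2 else d

def get_parent_workspace_properties_alt (properties : List (String × String)) (parent_workspace_properties : List (String × String)) : List (String × String) :=
  (parent_workspace_properties.foldl pvStepB (PySem.Dict.mk properties)).items

-- ===== PRECONDITION & SPEC =====
-- Pre_ excludes association lists with duplicate keys: those do not represent Python dicts (both
-- arguments are dicts in A), so no Python-reachable input is excluded.
def Pre_get_parent_workspace_properties (properties : List (String × String)) (parent_workspace_properties : List (String × String)) : Prop :=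
  (properties.map Prod.fst).Nodup ∧ (parent_workspace_properties.map Prod.fst).Nodup
instance (properties : List (String × String)) (parent_workspace_properties : List (String × String)) : Decidable (Pre_get_parent_workspace_properties properties parent_workspace_properties) := by unfold Pre_get_parent_workspace_properties; infer_instance

def pvWitness_get_parent_workspace_properties : (List (String × String)) × (List (String × String)) :=
  ([("parent_x", "old"), ("y", "2")], [("x", "new")])

def Spec_get_parent_workspace_properties (properties : List (String × String)) (parent_workspace_properties : List (String × String)) (out : List (String × String)) : Prop := out = get_parent_workspace_properties_alt properties parent_workspace_properties
instance (properties : List (String × String)) (parent_workspace_properties : List (String × String)) (out : List (String × String)) : Decidable (Spec_get_parent_workspace_properties properties parent_workspace_properties out) := by unfold Spec_get_parent_workspace_properties; infer_instance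

-- ===== CLAIM (what is proved, stated in full; the proofs are below) =====
def Claim_equal_get_parent_workspace_properties : Prop := ∀ (properties : List (String × String)) (parent_workspace_properties : List (String × String)), Dom_get_parent_workspace_properties properties parent_workspace_properties → Pre_get_parent_workspace_properties properties parent_workspace_properties → Spec_get_parent_workspace_properties properties parent_workspace_properties (get_parent_workspace_properties properties parent_workspace_properties)

-- ===== LEMMAS AND PROOFS =====

-- "parent_" ++ n starts with "parent_"
theorem pv_sw_append (n : String) : PySem.Str.startswith ("parent_" ++ n) "parent_" = true := by
  simp [PySem.Str.startswith, PySem.Chars.startswith, String.toList_append]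

-- ("parent_" ++ n)[7:] = n
theorem pv_slice7_append (n : String) : PySem.Str.slice ("parent_" ++ n) (some 7) none = n := by
  apply String.toList_inj.mp
  rw [PySem.Str.toList_slice, PySem.Chars.slice,
    PySem.List.slice_from _ (a := 7) (by norm_num), String.toList_append,
    show (7 : Int).toNat = "parent_".toList.length from rfl, List.drop_left]

-- if k starts with "parent_" then "parent_" ++ k[7:] = k
theorem pv_append_slice7 (k : String) (h : PySem.Str.startswith k "parent_" = true) :
    "parent_" ++ PySem.Str.slice k (some 7) none = k := by
  simp only [PySem.Str.startswith, PySem.Chars.startswith, List.isPrefixOf_iff_prefix] at h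
  obtain ⟨t, ht⟩ := h
  apply String.toList_inj.mp
  rw [String.toList_append, PySem.Str.toList_slice, PySem.Chars.slice,
    PySem.List.slice_from _ (a := 7) (by norm_num), ← ht,
    show (7 : Int).toNat = "parent_".toList.length from rfl, List.drop_left]

-- get? after A's loop
theorem pv_A_get? (pd : PySem.Dict String String) (keys : List String) (d : PySem.Dict String String) (k : String) :
    (keys.foldl (pvStepA pd) d).get? k =
      if k ∈ keys ∧ (pd.get? (PySem.Str.slice k (some 7) none)).isSome
      then pd.get? (PySem.Str.slice k (some 7) none) else d.get? k := by
  induction keys generalizing d with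
  | nil => simp
  | cons key rest ih =>
    rw [List.foldl_cons, ih]
    by_cases hrest : k ∈ rest ∧ (pd.get? (PySem.Str.slice k (some 7) none)).isSome
    · rw [if_pos hrest, if_pos ⟨List.mem_cons_of_mem _ hrest.1, hrest.2⟩]
    · rw [if_neg hrest]
      by_cases hk : key = k
      · subst hk
        unfold pvStepA
        cases hpd : pd.get? (PySem.Str.slice key (some 7) none) with
        | some v => simp [PySem.Dict.get?_insert_self]
        | none => simp
      · have hne : k ≠ key := fun h => hk h.symm
        have hstep : (pvStepA pd d key).get? k = d.get? k := by
          unfold pvStepA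
          cases pd.get? (PySem.Str.slice key (some 7) none) with
          | some v => simp [PySem.Dict.get?_insert, hne]
          | none => simp
        rw [hstep, if_neg]
        rintro ⟨hmem, hs⟩
        rcases List.mem_cons.mp hmem with h | h
        · exact hk h.symm
        · exact hrest ⟨h, hs⟩

-- keys after A's loop (each key already present)
theorem pv_A_keys (pd : PySem.Dict String String) (keys : List String) (d : PySem.Dict String String)
    (h : ∀ key ∈ keys, d.contains key = true) :
    (keys.foldl (pvStepA pd) d).keys = d.keys := by
  induction keys generalizing d with
  | nil => rfl
  | cons key rest ih =>
    rw [List.foldl_cons]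
    have hkeys : (pvStepA pd d key).keys = d.keys := by
      unfold pvStepA
      cases pd.get? (PySem.Str.slice key (some 7) none) with
      | some v => exact PySem.Dict.keys_insert_of_contains d v (h key (by simp))
      | none => rfl
    rw [ih _ ?_, hkeys]
    intro key' hk'
    rw [PySem.Dict.contains_eq_decide_mem_keys, hkeys,
      ← PySem.Dict.contains_eq_decide_mem_keys]
    exact h key' (by simp [hk'])

-- B's loop body never changes the key set
theorem pv_stepB_keys (d : PySem.Dict String String) (p : String × String) :
    (pvStepB d p).keys = d.keys := by
  unfold pvStepB
  by_cases hc : d.contains ("parent_" ++ p.1) = true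
  · simp [hc, PySem.Dict.keys_insert_of_contains d p.2 hc]
  · simp [hc]

theorem pv_stepB_contains (d : PySem.Dict String String) (p : String × String) (k : String) :
    (pvStepB d p).contains k = d.contains k := by
  rw [PySem.Dict.contains_eq_decide_mem_keys, pv_stepB_keys,
    ← PySem.Dict.contains_eq_decide_mem_keys]

theorem pv_stepB_get?_ne (d : PySem.Dict String String) (p : String × String) (k : String)
    (h : "parent_" ++ p.1 ≠ k) : (pvStepB d p).get? k = d.get? k := by
  unfold pvStepB
  by_cases hc : d.contains ("parent_" ++ p.1) = true
  · have hne : k ≠ "parent_" ++ p.1 := fun hh => h hh.symm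
    simp [hc, PySem.Dict.get?_insert, hne]
  · simp [hc]

-- keys after B's loop
theorem pv_B_keys (l : List (String × String)) (d : PySem.Dict String String) :
    (l.foldl pvStepB d).keys = d.keys := by
  induction l generalizing d with
  | nil => rfl
  | cons p rest ih => rw [List.foldl_cons, ih, pv_stepB_keys]

-- get? after B's loop (parent keys distinct)
theorem pv_B_get? (l : List (String × String)) (hl : (l.map Prod.fst).Nodup)
    (d : PySem.Dict String String) (k : String) :
    (l.foldl pvStepB d).get? k =
      if (PySem.Str.startswith k "parent_" = true ∧ d.contains k = true) ∧
          ((PySem.Dict.mk l).get? (PySem.Str.slice k (some 7) none)).isSome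
      then (PySem.Dict.mk l).get? (PySem.Str.slice k (some 7) none) else d.get? k := by
  induction l generalizing d with
  | nil =>
    simp [show ∀ x : String, (PySem.Dict.mk ([] : List (String × String))).get? x = none
      from fun _ => rfl]
  | cons p rest ih =>
    rw [List.map_cons, List.nodup_cons] at hl
    rw [List.foldl_cons, ih hl.2, pv_stepB_contains]
    by_cases hkey : ("parent_" ++ p.1) = k
    · subst hkey
      rw [pv_slice7_append]
      have h1 : (PySem.Dict.mk rest).get? p.1 = none := by
        rw [PySem.Dict.get?_eq_none_iff_not_mem_keys, PySem.Dict.keys_mk]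
        exact hl.1
      have h2 : (PySem.Dict.mk (p :: rest)).get? p.1 = some p.2 := by
        obtain ⟨a, b⟩ := p
        rw [PySem.Dict.get?_mk_cons]
        simp
      rw [h1, h2, pv_sw_append]
      simp only [Option.isSome_none, Bool.false_eq_true, and_false, if_false,
        Option.isSome_some, and_true, true_and]
      unfold pvStepB
      by_cases hc : d.contains ("parent_" ++ p.1) = true
      · simp [hc, PySem.Dict.get?_insert_self]
      · simp [hc]
    · rw [pv_stepB_get?_ne d p k hkey]
      by_cases hsw : PySem.Str.startswith k "parent_" = true
      · have hne : (p.1 == PySem.Str.slice k (some 7) none) = false := by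
          simp only [beq_eq_false_iff_ne, ne_eq]
          intro h
          exact hkey (by rw [h]; exact pv_append_slice7 k hsw)
        have h3 : (PySem.Dict.mk (p :: rest)).get? (PySem.Str.slice k (some 7) none) =
            (PySem.Dict.mk rest).get? (PySem.Str.slice k (some 7) none) := by
          obtain ⟨a, b⟩ := p
          rw [PySem.Dict.get?_mk_cons]
          simp_all
        rw [h3]
      · rw [if_neg (fun hcond => hsw hcond.1.1), if_neg (fun hcond => hsw hcond.1.1)]

-- the two loops produce the same items list
theorem pv_items_eq (properties parent : List (String × String))
    (hp : (properties.map Prod.fst).Nodup) (hq : (parent.map Prod.fst).Nodup) :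
    (((PySem.Dict.mk properties).keys.filter (fun key => PySem.Str.startswith key "parent_")).foldl
        (pvStepA (PySem.Dict.mk parent)) (PySem.Dict.mk properties)).items =
      (parent.foldl pvStepB (PySem.Dict.mk properties)).items := by
  have hnd : (PySem.Dict.mk properties).keys.Nodup := by
    rw [PySem.Dict.keys_mk]; exact hp
  have hkA : (((PySem.Dict.mk properties).keys.filter
        (fun key => PySem.Str.startswith key "parent_")).foldl
        (pvStepA (PySem.Dict.mk parent)) (PySem.Dict.mk properties)).keys =
      (PySem.Dict.mk properties).keys := by
    refine pv_A_keys _ _ _ fun key hk => ?_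
    rw [PySem.Dict.contains_eq_decide_mem_keys]
    exact decide_eq_true (List.mem_filter.mp hk).1
  have hkB := pv_B_keys parent (PySem.Dict.mk properties)
  have hget : ∀ k, (((PySem.Dict.mk properties).keys.filter
        (fun key => PySem.Str.startswith key "parent_")).foldl
        (pvStepA (PySem.Dict.mk parent)) (PySem.Dict.mk properties)).get? k =
      (parent.foldl pvStepB (PySem.Dict.mk properties)).get? k := by
    intro k
    rw [pv_A_get?, pv_B_get? parent hq]
    have hmem : k ∈ (PySem.Dict.mk properties).keys.filter
        (fun key => PySem.Str.startswith key "parent_") ↔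
        (PySem.Str.startswith k "parent_" = true ∧
          (PySem.Dict.mk properties).contains k = true) := by
      rw [List.mem_filter, PySem.Dict.contains_eq_decide_mem_keys]
      simp [and_comm]
    rw [if_congr (and_congr_left fun _ => hmem) rfl rfl]
  rw [PySem.Dict.items_eq_map_keys _ (by rw [hkA]; exact hnd) "",
    PySem.Dict.items_eq_map_keys _ (by rw [hkB]; exact hnd) "", hkA, hkB]
  refine List.map_congr_left fun k _ => ?_
  rw [PySem.Dict.getD_eq_get?_getD, PySem.Dict.getD_eq_get?_getD, hget k]

-- ===== VERDICT (by name: the statement is the Claim_ definition above) =====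
theorem get_parent_workspace_properties_spec : Claim_equal_get_parent_workspace_properties := by
  intro properties parent _ hpre
  unfold Spec_get_parent_workspace_properties get_parent_workspace_properties get_parent_workspace_properties_alt
  obtain ⟨hp, hq⟩ := hpre
  by_cases hqe : parent.isEmpty
  · rw [if_pos hqe]
    rw [List.isEmpty_iff] at hqe
    subst hqe; rfl
  · rw [if_neg hqe]
    by_cases hfk : ((PySem.Dict.mk properties).keys.filter
        (fun key => PySem.Str.startswith key "parent_")).isEmpty
    · rw [if_pos hfk]
      have h := pv_items_eq properties parent hp hq
      rw [List.isEmpty_iff] at hfk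
      rw [hfk] at h
      simpa using h
    · rw [if_neg hfk]
      exact pv_items_eq properties parent hp hq
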